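-- pv_equiv track=rewrite | github.com/krshna4sri/cr-counter_mc | cr_counter_app_viz_full.py | generate_counter_species
-- ===== SOURCE A (Python) =====
-- from typing import List, Tuple, Optional
--
-- MAJOR_PC = {"C":0,"G":7,"D":2,"A":9,"E":4,"B":11,"F#":6,"C#":1,"F":5,"Bb":10,"Eb":3,"Ab":8,"Db":1,"Gb":6,"Cb":11}
--
-- DIATONIC_MAJOR = [0,2,4,5,7,9,11]
--
-- DIATONIC_NAT_MINOR = [0,2,3,5,7,8,10]
--
-- DIATONIC_HARM_MINOR = [0,2,3,5,7,8,11]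
--
-- RAGA_DEGREES = {
--     "Shankarabharanam (Major)":       [0,2,4,5,7,9,11],
--     "Kalyani (Lydian #4)":            [0,2,4,6,7,9,11],
--     "Harikambhoji (Mixolydian)":      [0,2,4,5,7,9,10],
--     "Kharaharapriya (Dorian)":        [0,2,3,5,7,9,10],
--     "Natabhairavi (Natural Minor)":   [0,2,3,5,7,8,10],
--     "Keeravani (Harmonic Minor)":     [0,2,3,5,7,8,11],
--     "Charukesi":                      [0,2,4,5,7,8,11],
--     "Sarasangi":                      [0,1,4,5,7,9,11],
--     "Mararanjani":                    [0,2,4,6,7,8,10],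
--
--     # Pentatonic
--     "Mohanam (Major Pentatonic)":     [0,2,4,7,9],
--     "Hamsadhwani":                    [0,2,4,7,11],
--     "Hindolam":                       [0,3,5,8,11],   # fixed
--     "Suddha Saveri":                  [0,2,5,7,9],
--     "Abhogi":                         [0,2,3,5,7],
--     "Sreeranjani":                    [0,2,3,6,9],
--     "Madhyamavati":                   [0,2,5,7,10],
--     "Megh (Megh Malhar)":             [0,2,5,7,9],
--
--     # Hexatonic / others
--     "Durga":                          [0,2,5,7,9,10],
--     "Devakriya (Sudha Dhanyasi)":     [0,2,3,7,9],
--     "Revati":                         [0,1,5,7,11],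
--     "Amritavarshini":                 [0,4,6,7,11],
--     "Vachaspati (Lydian b7)":         [0,2,4,6,7,9,10],
--     "Hemavati":                       [0,2,3,6,7,9,11],
--     "Shubhapantuvarali":              [0,1,4,5,7,8,11],
--     "Todi (Hanumatodi)":              [0,1,3,6,7,8,11],
-- }
--
-- def raga_scale_midis(key: str, raga: Optional[str], low=36, high=96) -> List[int]:
--     tonic = MAJOR_PC[key]
--     if not raga or raga == "None (use Western mode)":
--         return list(range(low, high+1))  # neutral; caller filters with Western mode
--     degrees = set(RAGA_DEGREES.get(raga, DIATONIC_MAJOR))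
--     allowed_pc = set((tonic + d) % 12 for d in degrees)
--     return [m for m in range(low, high+1) if (m % 12) in allowed_pc]
--
-- def western_scale_midis(key: str, mode: str, low=36, high=96) -> List[int]:
--     tonic = MAJOR_PC[key]
--     if mode=="major": allowed = set((tonic + d) % 12 for d in DIATONIC_MAJOR)
--     elif mode=="natural_minor": allowed = set((tonic + d) % 12 for d in DIATONIC_NAT_MINOR)
--     else: allowed = set((tonic + d) % 12 for d in DIATONIC_HARM_MINOR)
--     return [m for m in range(low, high+1) if (m % 12) in allowed]
--
-- def scale_midis(key: str, mode: str, raga: Optional[str], low=36, high=96) -> List[int]: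
--     if raga and raga != "None (use Western mode)":
--         return raga_scale_midis(key, raga, low, high)
--     return western_scale_midis(key, mode, low, high)
--
-- def consonant_with(a:int, b:int) -> bool:
--     d = abs((a-b)%12); return d in (0,3,4,5,7,8,9)
--
-- def step_options(p:int, scale:List[int]): return [x for x in (p-2,p-1,p+1,p+2) if x in scale]
--
-- def generate_counter_species(cantus_slots, key, mode, raga, bars, species, register=(55,84)):
--     scale = scale_midis(key, mode, raga, low=register[0], high=register[1])
--     total = bars*8; out=[]; i=0
--     while i < total:
--         c = cantus_slots[i]
--         if species == "1":
--             cand = min(scale, key=lambda n: (0 if consonant_with(n,c) else 1, abs(n-c))); out += [cand]*8; i += 8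
--         elif species == "2":
--             first = min(scale, key=lambda n: (0 if consonant_with(n,c) else 1, abs(n-c)))
--             second = min(step_options(first, scale) or [first], key=lambda n: abs(n-first))
--             out += [first]*4 + [second]*4; i += 8
--         elif species == "3":
--             b1 = min(scale, key=lambda n: (0 if consonant_with(n,c) else 1, abs(n-c)))
--             s1 = min(step_options(b1, scale) or [b1], key=lambda n: abs(n-b1))
--             b3 = min(scale, key=lambda n: (0 if consonant_with(n,c) else 1, abs(n-c)))
--             s3 = min(step_options(b3, scale) or [b3], key=lambda n: abs(n-b3))
--             out += [b1]*2 + [s1]*2 + [b3]*2 + [s3]*2; i += 8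
--         elif species == "4":
--             held = min(scale, key=lambda n: (0 if consonant_with(n,c) else 1, abs(n-c)))
--             res = [n for n in (held-1,held-2) if n in scale] or step_options(held, scale) or [held]
--             out += [held]*6 + [res[0]]*2; i += 8
--         else:  # "5" or "Classical"
--             b1 = min(scale, key=lambda n: (0 if consonant_with(n,c) else 1, abs(n-c)))
--             n1 = min(step_options(b1, scale) or [b1], key=lambda n: abs(n-b1))
--             n2 = min(step_options(n1, scale) or [n1], key=lambda n: abs(n-n1))
--             b3 = min(scale, key=lambda n: (0 if consonant_with(n,c) else 1, abs(n-c)))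
--             n3 = min(step_options(b3, scale) or [b3], key=lambda n: abs(n-b3))
--             n4 = min(step_options(n3, scale) or [n3], key=lambda n: abs(n-n3))
--             out += [b1, n1, n2, n2, b3, n3, n4, n4]; i += 8
--     return out[:total]
-- ===== SOURCE B (Python) =====
-- # Different algorithm: 12 precomputed pitch-class consonance pools + binary-search
-- # nearest-note selection and greedy neighbour chains replace A's per-slot min-scans
-- # with lexicographic keys. Objective: alternative.
-- from typing import List, Optional
--
-- MAJOR_PC = {"C":0,"G":7,"D":2,"A":9,"E":4,"B":11,"F#":6,"C#":1,"F":5,"Bb":10,"Eb":3,"Ab":8,"Db":1,"Gb":6,"Cb":11}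
-- DIATONIC_MAJOR = [0,2,4,5,7,9,11]
-- DIATONIC_NAT_MINOR = [0,2,3,5,7,8,10]
-- DIATONIC_HARM_MINOR = [0,2,3,5,7,8,11]
-- RAGA_DEGREES = {
--     "Shankarabharanam (Major)":       [0,2,4,5,7,9,11],
--     "Kalyani (Lydian #4)":            [0,2,4,6,7,9,11],
--     "Harikambhoji (Mixolydian)":      [0,2,4,5,7,9,10],
--     "Kharaharapriya (Dorian)":        [0,2,3,5,7,9,10],
--     "Natabhairavi (Natural Minor)":   [0,2,3,5,7,8,10],
--     "Keeravani (Harmonic Minor)":     [0,2,3,5,7,8,11],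
--     "Charukesi":                      [0,2,4,5,7,8,11],
--     "Sarasangi":                      [0,1,4,5,7,9,11],
--     "Mararanjani":                    [0,2,4,6,7,8,10],
--     "Mohanam (Major Pentatonic)":     [0,2,4,7,9],
--     "Hamsadhwani":                    [0,2,4,7,11],
--     "Hindolam":                       [0,3,5,8,11],
--     "Suddha Saveri":                  [0,2,5,7,9],
--     "Abhogi":                         [0,2,3,5,7],
--     "Sreeranjani":                    [0,2,3,6,9],
--     "Madhyamavati":                   [0,2,5,7,10],
--     "Megh (Megh Malhar)":             [0,2,5,7,9],
--     "Durga":                          [0,2,5,7,9,10],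
--     "Devakriya (Sudha Dhanyasi)":     [0,2,3,7,9],
--     "Revati":                         [0,1,5,7,11],
--     "Amritavarshini":                 [0,4,6,7,11],
--     "Vachaspati (Lydian b7)":         [0,2,4,6,7,9,10],
--     "Hemavati":                       [0,2,3,6,7,9,11],
--     "Shubhapantuvarali":              [0,1,4,5,7,8,11],
--     "Todi (Hanumatodi)":              [0,1,3,6,7,8,11],
-- }
--
-- def raga_scale_midis(key, raga, low=36, high=96):
--     tonic = MAJOR_PC[key]
--     if not raga or raga == "None (use Western mode)":
--         return list(range(low, high+1))
--     degrees = set(RAGA_DEGREES.get(raga, DIATONIC_MAJOR))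
--     allowed_pc = set((tonic + d) % 12 for d in degrees)
--     return [m for m in range(low, high+1) if (m % 12) in allowed_pc]
--
-- def western_scale_midis(key, mode, low=36, high=96):
--     tonic = MAJOR_PC[key]
--     if mode=="major": allowed = set((tonic + d) % 12 for d in DIATONIC_MAJOR)
--     elif mode=="natural_minor": allowed = set((tonic + d) % 12 for d in DIATONIC_NAT_MINOR)
--     else: allowed = set((tonic + d) % 12 for d in DIATONIC_HARM_MINOR)
--     return [m for m in range(low, high+1) if (m % 12) in allowed]
--
-- def scale_midis(key, mode, raga, low=36, high=96):
--     if raga and raga != "None (use Western mode)":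
--         return raga_scale_midis(key, raga, low, high)
--     return western_scale_midis(key, mode, low, high)
--
-- CONS = (0, 3, 4, 5, 7, 8, 9)
--
-- def _bisect_left(pool, c):
--     lo, hi = 0, len(pool)
--     while lo < hi:
--         mid = (lo + hi) // 2
--         if pool[mid] < c:
--             lo = mid + 1
--         else:
--             hi = mid
--     return lo
--
-- def _nearest(pool, c):
--     """Nearest element of the sorted (ascending, distinct) pool; ties -> lower note."""
--     j = _bisect_left(pool, c)
--     if j == 0:
--         return pool[0]
--     if j == len(pool):
--         return pool[-1]
--     a, b = pool[j-1], pool[j]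
--     return a if c - a <= b - c else b
--
-- def _step_note(p, sset):
--     for x in (p-1, p+1, p-2, p+2):
--         if x in sset:
--             return x
--     return p
--
-- def _res_note(held, sset):
--     for x in (held-1, held-2, held+1, held+2):
--         if x in sset:
--             return x
--     return held
--
-- def generate_counter_species(cantus_slots, key, mode, raga, bars, species, register=(55,84)):
--     scale = scale_midis(key, mode, raga, low=register[0], high=register[1])
--     sset = set(scale)
--     pools = [[n for n in scale if (n - pc) % 12 in CONS] for pc in range(12)]
--     out = []
--     for k in range(bars):
--         c = cantus_slots[8*k]
--         pool = pools[c % 12]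
--         b1 = _nearest(pool if pool else scale, c)
--         if species == "1":
--             block = [b1]*8
--         elif species == "2":
--             s = _step_note(b1, sset)
--             block = [b1]*4 + [s]*4
--         elif species == "3":
--             s = _step_note(b1, sset)
--             block = [b1]*2 + [s]*2 + [b1]*2 + [s]*2
--         elif species == "4":
--             r = _res_note(b1, sset)
--             block = [b1]*6 + [r]*2
--         else:
--             n1 = _step_note(b1, sset)
--             n2 = _step_note(n1, sset)
--             block = [b1, n1, n2, n2, b1, n1, n2, n2]
--         out += block
--     return out
-- ===== Notes on version B (the rewrite author's own statement) =====
-- stated objective: alternative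
-- what changed: B replaces A's per-slot min-scans with lexicographic (consonance, distance) keys by a build-table-then-search algorithm: it precomputes 12 pitch-class-indexed consonant pools once, picks each bar's base note by binary search (bisect) for the nearest pool note with ties to the lower note, and replaces the min-over-step-options scans by greedy if-chain neighbour picks over a membership set; the trailing out[:total] slice disappears.
import Mathlib
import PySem

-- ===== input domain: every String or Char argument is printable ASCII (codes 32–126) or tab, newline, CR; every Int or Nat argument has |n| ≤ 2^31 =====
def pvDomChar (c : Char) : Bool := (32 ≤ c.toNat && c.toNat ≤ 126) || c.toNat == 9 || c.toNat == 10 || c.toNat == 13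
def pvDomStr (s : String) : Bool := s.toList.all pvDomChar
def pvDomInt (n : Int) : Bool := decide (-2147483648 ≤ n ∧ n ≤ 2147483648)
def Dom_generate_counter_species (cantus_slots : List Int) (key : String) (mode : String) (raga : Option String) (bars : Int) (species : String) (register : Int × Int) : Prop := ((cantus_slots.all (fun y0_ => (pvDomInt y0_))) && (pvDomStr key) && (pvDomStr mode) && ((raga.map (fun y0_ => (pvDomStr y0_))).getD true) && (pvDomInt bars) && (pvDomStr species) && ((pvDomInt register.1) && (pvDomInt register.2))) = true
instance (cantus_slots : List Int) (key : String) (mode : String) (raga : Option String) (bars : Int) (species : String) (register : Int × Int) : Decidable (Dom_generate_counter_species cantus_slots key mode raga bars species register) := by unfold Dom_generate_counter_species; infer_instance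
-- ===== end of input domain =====

-- B replaces the per-slot min-scans with 12 precomputed pitch-class consonant pools,
-- a binary-search nearest-note pick and greedy if-chain neighbour picks; objective: alternative.

-- ===== shared module context (constants and module-level helpers of the Python file) =====
def MAJOR_PC : PySem.Dict String Int := PySem.Dict.ofList
  [("C",0),("G",7),("D",2),("A",9),("E",4),("B",11),("F#",6),("C#",1),("F",5),
   ("Bb",10),("Eb",3),("Ab",8),("Db",1),("Gb",6),("Cb",11)]

def DIATONIC_MAJOR : List Int := [0,2,4,5,7,9,11]
def DIATONIC_NAT_MINOR : List Int := [0,2,3,5,7,8,10]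
def DIATONIC_HARM_MINOR : List Int := [0,2,3,5,7,8,11]

def RAGA_DEGREES : PySem.Dict String (List Int) := PySem.Dict.ofList
  [("Shankarabharanam (Major)",[0,2,4,5,7,9,11]),
   ("Kalyani (Lydian #4)",[0,2,4,6,7,9,11]),
   ("Harikambhoji (Mixolydian)",[0,2,4,5,7,9,10]),
   ("Kharaharapriya (Dorian)",[0,2,3,5,7,9,10]),
   ("Natabhairavi (Natural Minor)",[0,2,3,5,7,8,10]),
   ("Keeravani (Harmonic Minor)",[0,2,3,5,7,8,11]),
   ("Charukesi",[0,2,4,5,7,8,11]),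
   ("Sarasangi",[0,1,4,5,7,9,11]),
   ("Mararanjani",[0,2,4,6,7,8,10]),
   ("Mohanam (Major Pentatonic)",[0,2,4,7,9]),
   ("Hamsadhwani",[0,2,4,7,11]),
   ("Hindolam",[0,3,5,8,11]),
   ("Suddha Saveri",[0,2,5,7,9]),
   ("Abhogi",[0,2,3,5,7]),
   ("Sreeranjani",[0,2,3,6,9]),
   ("Madhyamavati",[0,2,5,7,10]),
   ("Megh (Megh Malhar)",[0,2,5,7,9]),
   ("Durga",[0,2,5,7,9,10]),
   ("Devakriya (Sudha Dhanyasi)",[0,2,3,7,9]),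
   ("Revati",[0,1,5,7,11]),
   ("Amritavarshini",[0,4,6,7,11]),
   ("Vachaspati (Lydian b7)",[0,2,4,6,7,9,10]),
   ("Hemavati",[0,2,3,6,7,9,11]),
   ("Shubhapantuvarali",[0,1,4,5,7,8,11]),
   ("Todi (Hanumatodi)",[0,1,3,6,7,8,11])]

-- raga_scale_midis; MAJOR_PC[key] raises KeyError for unknown key — excluded by Pre_, .getD 0 unreachable there
def raga_scale_midis (key : String) (raga : Option String) (low high : Int) : List Int :=
  let tonic := (MAJOR_PC.get? key).getD 0
  match raga with
  | none => PySem.List.pyRange low (high+1) 1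
  | some r =>
    if r == "" || r == "None (use Western mode)" then PySem.List.pyRange low (high+1) 1
    else
      let degrees := PySem.Set.ofList (RAGA_DEGREES.getD r DIATONIC_MAJOR)
      -- set comprehension over a set: only membership in allowed_pc is consumed, order-independent
      let allowed_pc := PySem.Set.ofList (degrees.map (fun d => PySem.Int.mod (tonic + d) 12))
      (PySem.List.pyRange low (high+1) 1).filter (fun m => PySem.Set.contains allowed_pc (PySem.Int.mod m 12))

def western_scale_midis (key : String) (mode : String) (low high : Int) : List Int :=
  let tonic := (MAJOR_PC.get? key).getD 0
  let allowed :=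
    if mode == "major" then PySem.Set.ofList (DIATONIC_MAJOR.map (fun d => PySem.Int.mod (tonic + d) 12))
    else if mode == "natural_minor" then PySem.Set.ofList (DIATONIC_NAT_MINOR.map (fun d => PySem.Int.mod (tonic + d) 12))
    else PySem.Set.ofList (DIATONIC_HARM_MINOR.map (fun d => PySem.Int.mod (tonic + d) 12))
  (PySem.List.pyRange low (high+1) 1).filter (fun m => PySem.Set.contains allowed (PySem.Int.mod m 12))

def scale_midis (key : String) (mode : String) (raga : Option String) (low high : Int) : List Int :=
  match raga with
  | some r => if r ≠ "" ∧ r ≠ "None (use Western mode)" then raga_scale_midis key (some r) low high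
              else western_scale_midis key mode low high
  | none => western_scale_midis key mode low high

def consonant_with (a b : Int) : Bool :=
  let d := |PySem.Int.mod (a - b) 12|
  ([0,3,4,5,7,8,9] : List Int).contains d

def step_options (p : Int) (scale : List Int) : List Int :=
  ([p-2, p-1, p+1, p+2] : List Int).filter (fun x => scale.contains x)

-- ===== PORT A =====
-- min(scale, key=…) raises ValueError on an empty scale and cantus_slots[i] raises IndexError
-- past the end: both excluded by Pre_, so every `.getD` default below is unreachable under Pre_.
def loopA (cantus_slots scale : List Int) (species : String) (total : Int) (i : Int) (out : List Int) : List Int :=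
  if _h : i < total then
    let c := (PySem.List.pyGet? cantus_slots i).getD 0
    if species == "1" then
      let cand := (PySem.List.min2? scale (fun n => if consonant_with n c then (0:Int) else 1) (fun n => |n - c|)).getD 0
      loopA cantus_slots scale species total (i+8) (out ++ PySem.List.pyRepeat [cand] 8)
    else if species == "2" then
      let first := (PySem.List.min2? scale (fun n => if consonant_with n c then (0:Int) else 1) (fun n => |n - c|)).getD 0
      let second := (PySem.List.min? (let o := step_options first scale; if o.isEmpty then [first] else o) (fun n => |n - first|)).getD 0
      loopA cantus_slots scale species total (i+8) (out ++ (PySem.List.pyRepeat [first] 4 ++ PySem.List.pyRepeat [second] 4))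
    else if species == "3" then
      let b1 := (PySem.List.min2? scale (fun n => if consonant_with n c then (0:Int) else 1) (fun n => |n - c|)).getD 0
      let s1 := (PySem.List.min? (let o := step_options b1 scale; if o.isEmpty then [b1] else o) (fun n => |n - b1|)).getD 0
      let b3 := (PySem.List.min2? scale (fun n => if consonant_with n c then (0:Int) else 1) (fun n => |n - c|)).getD 0
      let s3 := (PySem.List.min? (let o := step_options b3 scale; if o.isEmpty then [b3] else o) (fun n => |n - b3|)).getD 0
      loopA cantus_slots scale species total (i+8) (out ++ (PySem.List.pyRepeat [b1] 2 ++ PySem.List.pyRepeat [s1] 2 ++ PySem.List.pyRepeat [b3] 2 ++ PySem.List.pyRepeat [s3] 2))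
    else if species == "4" then
      let held := (PySem.List.min2? scale (fun n => if consonant_with n c then (0:Int) else 1) (fun n => |n - c|)).getD 0
      let res := (let r := ([held-1, held-2] : List Int).filter (fun n => scale.contains n)
                  if r.isEmpty then (let so := step_options held scale; if so.isEmpty then [held] else so) else r)
      loopA cantus_slots scale species total (i+8) (out ++ (PySem.List.pyRepeat [held] 6 ++ PySem.List.pyRepeat [(PySem.List.pyGet? res 0).getD 0] 2))
    else
      let b1 := (PySem.List.min2? scale (fun n => if consonant_with n c then (0:Int) else 1) (fun n => |n - c|)).getD 0
      let n1 := (PySem.List.min? (let o := step_options b1 scale; if o.isEmpty then [b1] else o) (fun n => |n - b1|)).getD 0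
      let n2 := (PySem.List.min? (let o := step_options n1 scale; if o.isEmpty then [n1] else o) (fun n => |n - n1|)).getD 0
      let b3 := (PySem.List.min2? scale (fun n => if consonant_with n c then (0:Int) else 1) (fun n => |n - c|)).getD 0
      let n3 := (PySem.List.min? (let o := step_options b3 scale; if o.isEmpty then [b3] else o) (fun n => |n - b3|)).getD 0
      let n4 := (PySem.List.min? (let o := step_options n3 scale; if o.isEmpty then [n3] else o) (fun n => |n - n3|)).getD 0
      loopA cantus_slots scale species total (i+8) (out ++ [b1, n1, n2, n2, b3, n3, n4, n4])
  else out
termination_by (total - i).toNat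
decreasing_by all_goals omega

def generate_counter_species (cantus_slots : List Int) (key : String) (mode : String) (raga : Option String) (bars : Int) (species : String) (register : Int × Int) : List Int :=
  let scale := scale_midis key mode raga register.1 register.2
  let total := bars * 8
  PySem.List.slice (loopA cantus_slots scale species total 0 []) none (some total)

-- ===== PORT B =====  (transliteration of Source B)
def CONS : List Int := [0, 3, 4, 5, 7, 8, 9]

-- _bisect_left from Source B; pool[mid] is always in range (0 ≤ lo ≤ mid < hi ≤ len), so .getD is exact
def bisectLoop (pool : List Int) (c : Int) (lo hi : Nat) : Nat :=
  if _h : lo < hi then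
    let mid := (lo + hi) / 2
    if pool.getD mid 0 < c then bisectLoop pool c (mid+1) hi else bisectLoop pool c lo mid
  else lo
termination_by hi - lo
decreasing_by all_goals omega

-- _nearest from Source B; pool is nonempty at every call site admitted by Pre_, indices in range
def nearest (pool : List Int) (c : Int) : Int :=
  let j := bisectLoop pool c 0 pool.length
  if j = 0 then pool.getD 0 0
  else if j = pool.length then pool.getD (pool.length - 1) 0
  else
    let a := pool.getD (j-1) 0
    let b := pool.getD j 0
    if c - a ≤ b - c then a else b

-- _step_note: a for-loop over 4 candidates with early return = if-chain
def step_note (p : Int) (sset : PySem.Set Int) : Int :=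
  if PySem.Set.contains sset (p-1) then p-1
  else if PySem.Set.contains sset (p+1) then p+1
  else if PySem.Set.contains sset (p-2) then p-2
  else if PySem.Set.contains sset (p+2) then p+2
  else p

-- _res_note: same shape, candidate order held-1, held-2, held+1, held+2
def res_note (held : Int) (sset : PySem.Set Int) : Int :=
  if PySem.Set.contains sset (held-1) then held-1
  else if PySem.Set.contains sset (held-2) then held-2
  else if PySem.Set.contains sset (held+1) then held+1
  else if PySem.Set.contains sset (held+2) then held+2
  else held

-- pools = [[n for n in scale if (n - pc) % 12 in CONS] for pc in range(12)]
def consPools (scale : List Int) : List (List Int) :=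
  (PySem.List.pyRange 0 12 1).map (fun pc => scale.filter (fun n => CONS.contains (PySem.Int.mod (n - pc) 12)))

-- the body of Source B's for-loop (one bar)
def altStep (cantus_slots scale : List Int) (sset : PySem.Set Int) (pools : List (List Int)) (species : String) (out : List Int) (k : Int) : List Int :=
  let c := (PySem.List.pyGet? cantus_slots (8*k)).getD 0
  let pool := PySem.List.pyGetD pools (PySem.Int.mod c 12) []
  let b1 := nearest (if pool.isEmpty then scale else pool) c
  let block :=
    if species == "1" then PySem.List.pyRepeat [b1] 8
    else if species == "2" then
      let s := step_note b1 sset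
      PySem.List.pyRepeat [b1] 4 ++ PySem.List.pyRepeat [s] 4
    else if species == "3" then
      let s := step_note b1 sset
      PySem.List.pyRepeat [b1] 2 ++ PySem.List.pyRepeat [s] 2 ++ PySem.List.pyRepeat [b1] 2 ++ PySem.List.pyRepeat [s] 2
    else if species == "4" then
      let r := res_note b1 sset
      PySem.List.pyRepeat [b1] 6 ++ PySem.List.pyRepeat [r] 2
    else
      let n1 := step_note b1 sset
      let n2 := step_note n1 sset
      [b1, n1, n2, n2, b1, n1, n2, n2]
  out ++ block

def generate_counter_species_alt (cantus_slots : List Int) (key : String) (mode : String) (raga : Option String) (bars : Int) (species : String) (register : Int × Int) : List Int :=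
  let scale := scale_midis key mode raga register.1 register.2
  let sset := PySem.Set.ofList scale
  let pools := consPools scale
  (PySem.List.pyRange 0 bars 1).foldl (altStep cantus_slots scale sset pools species) []

-- ===== PRECONDITION & SPEC =====
-- Pre_ excludes exactly the inputs where the Python raises: an unknown key (KeyError in
-- MAJOR_PC[key]), and — when at least one bar is generated — an empty playable scale
-- (ValueError from min(scale, …)) or a cantus too short for the last block start
-- (IndexError in cantus_slots[i]).
def Pre_generate_counter_species (cantus_slots : List Int) (key : String) (mode : String) (raga : Option String) (bars : Int) (species : String) (register : Int × Int) : Prop :=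
  MAJOR_PC.contains key = true ∧
  (0 < bars → 8 * (bars - 1) < (cantus_slots.length : Int) ∧ scale_midis key mode raga register.1 register.2 ≠ [])
instance (cantus_slots : List Int) (key : String) (mode : String) (raga : Option String) (bars : Int) (species : String) (register : Int × Int) : Decidable (Pre_generate_counter_species cantus_slots key mode raga bars species register) := by unfold Pre_generate_counter_species; infer_instance

def pvWitness_generate_counter_species : List Int × String × String × Option String × Int × String × (Int × Int) :=
  ([64, 62, 60, 59, 57, 59, 60, 62, 64, 66, 67], "G", "major", some "Hamsadhwani", 1, "5", (55, 84))

def Spec_generate_counter_species (cantus_slots : List Int) (key : String) (mode : String) (raga : Option String) (bars : Int) (species : String) (register : Int × Int) (out : List Int) : Prop := out = generate_counter_species_alt cantus_slots key mode raga bars species register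
instance (cantus_slots : List Int) (key : String) (mode : String) (raga : Option String) (bars : Int) (species : String) (register : Int × Int) (out : List Int) : Decidable (Spec_generate_counter_species cantus_slots key mode raga bars species register out) := by unfold Spec_generate_counter_species; infer_instance

-- ===== CLAIM (what is proved, stated in full; the proofs are below) =====
def Claim_equal_generate_counter_species : Prop := ∀ (cantus_slots : List Int) (key : String) (mode : String) (raga : Option String) (bars : Int) (species : String) (register : Int × Int), Dom_generate_counter_species cantus_slots key mode raga bars species register → Pre_generate_counter_species cantus_slots key mode raga bars species register → Spec_generate_counter_species cantus_slots key mode raga bars species register (generate_counter_species cantus_slots key mode raga bars species register)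

-- ===== LEMMAS AND PROOFS =====

-- A's 8-note block for one cantus value c, read off from A's loop body
def species_blockA (c : Int) (scale : List Int) (species : String) : List Int :=
  if species == "1" then
    let cand := (PySem.List.min2? scale (fun n => if consonant_with n c then (0:Int) else 1) (fun n => |n - c|)).getD 0
    PySem.List.pyRepeat [cand] 8
  else if species == "2" then
    let first := (PySem.List.min2? scale (fun n => if consonant_with n c then (0:Int) else 1) (fun n => |n - c|)).getD 0
    let second := (PySem.List.min? (let o := step_options first scale; if o.isEmpty then [first] else o) (fun n => |n - first|)).getD 0
    PySem.List.pyRepeat [first] 4 ++ PySem.List.pyRepeat [second] 4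
  else if species == "3" then
    let b1 := (PySem.List.min2? scale (fun n => if consonant_with n c then (0:Int) else 1) (fun n => |n - c|)).getD 0
    let s1 := (PySem.List.min? (let o := step_options b1 scale; if o.isEmpty then [b1] else o) (fun n => |n - b1|)).getD 0
    PySem.List.pyRepeat [b1] 2 ++ PySem.List.pyRepeat [s1] 2 ++ PySem.List.pyRepeat [b1] 2 ++ PySem.List.pyRepeat [s1] 2
  else if species == "4" then
    let held := (PySem.List.min2? scale (fun n => if consonant_with n c then (0:Int) else 1) (fun n => |n - c|)).getD 0
    let res := (let r := ([held-1, held-2] : List Int).filter (fun n => scale.contains n)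
                if r.isEmpty then (let so := step_options held scale; if so.isEmpty then [held] else so) else r)
    PySem.List.pyRepeat [held] 6 ++ PySem.List.pyRepeat [(PySem.List.pyGet? res 0).getD 0] 2
  else
    let b1 := (PySem.List.min2? scale (fun n => if consonant_with n c then (0:Int) else 1) (fun n => |n - c|)).getD 0
    let n1 := (PySem.List.min? (let o := step_options b1 scale; if o.isEmpty then [b1] else o) (fun n => |n - b1|)).getD 0
    let n2 := (PySem.List.min? (let o := step_options n1 scale; if o.isEmpty then [n1] else o) (fun n => |n - n1|)).getD 0
    [b1, n1, n2, n2, b1, n1, n2, n2]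

-- the sequence of 8-note blocks both programs emit
def blocks (cantus_slots scale : List Int) (species : String) (total : Int) (i : Int) : List Int :=
  if _h : i < total then
    species_blockA ((PySem.List.pyGet? cantus_slots i).getD 0) scale species ++ blocks cantus_slots scale species total (i+8)
  else []
termination_by (total - i).toNat
decreasing_by omega

theorem loopA_eq_blocks (cantus_slots scale : List Int) (species : String) (total : Int) :
    ∀ i out, loopA cantus_slots scale species total i out = out ++ blocks cantus_slots scale species total i := by
  have key : ∀ n : Nat, ∀ i out, (total - i).toNat ≤ n →
      loopA cantus_slots scale species total i out = out ++ blocks cantus_slots scale species total i := by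
    intro n
    induction n with
    | zero =>
      intro i out hn
      rw [loopA, blocks]
      rw [dif_neg (by omega), dif_neg (by omega)]
      simp
    | succ m ih =>
      intro i out hn
      by_cases hi : i < total
      · rw [loopA, blocks, dif_pos hi, dif_pos hi]
        have hstep : (total - (i+8)).toNat ≤ m := by omega
        by_cases h1 : species == "1"
        · rw [if_pos h1]
          rw [ih _ _ hstep]
          simp only [species_blockA, if_pos h1, List.append_assoc]
        · rw [if_neg h1]
          by_cases h2 : species == "2"
          · rw [if_pos h2, ih _ _ hstep]
            simp only [species_blockA, if_neg h1, if_pos h2, List.append_assoc]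
          · rw [if_neg h2]
            by_cases h3 : species == "3"
            · rw [if_pos h3, ih _ _ hstep]
              simp only [species_blockA, if_neg h1, if_neg h2, if_pos h3, List.append_assoc]
            · rw [if_neg h3]
              by_cases h4 : species == "4"
              · rw [if_pos h4, ih _ _ hstep]
                simp only [species_blockA, if_neg h1, if_neg h2, if_neg h3, if_pos h4, List.append_assoc]
              · rw [if_neg h4, ih _ _ hstep]
                simp only [species_blockA, if_neg h1, if_neg h2, if_neg h3, if_neg h4, List.append_assoc]
      · rw [loopA, blocks, dif_neg hi, dif_neg hi]
        simp
  intro i out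
  exact key (total - i).toNat i out le_rfl

theorem length_species_blockA (c : Int) (scale : List Int) (species : String) :
    (species_blockA c scale species).length = 8 := by
  rw [species_blockA]
  split_ifs <;>
    simp [PySem.List.pyRepeat_singleton]

theorem length_blocks (cantus_slots scale : List Int) (species : String) (total : Int) :
    ∀ k : Nat, ∀ i, total - i = 8 * (k : Int) → (blocks cantus_slots scale species total i).length = 8 * k := by
  intro k
  induction k with
  | zero =>
    intro i hk
    rw [blocks, dif_neg (by omega)]
    simp
  | succ m ih =>
    intro i hk
    rw [blocks, dif_pos (by push_cast at hk ⊢; omega)]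
    rw [List.length_append, length_species_blockA, ih (i+8) (by push_cast at hk ⊢; omega)]
    ring

-- ---- sortedness of the scale ----
theorem sorted_scale (key mode : String) (raga : Option String) (lo hi : Int) :
    (scale_midis key mode raga lo hi).Pairwise (· < ·) := by
  have hp := PySem.List.pairwise_lt_pyRange_one lo (hi+1)
  unfold scale_midis raga_scale_midis western_scale_midis
  rcases raga with _ | r <;> simp only
  · split_ifs <;> exact hp.filter _
  · split_ifs <;> first | exact hp | exact hp.filter _

theorem getD_mono_of_pairwise (pool : List Int) (hs : pool.Pairwise (· < ·)) :
    ∀ i j : Nat, i < j → j < pool.length → pool.getD i 0 < pool.getD j 0 := by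
  intro i j hij hj
  rw [List.getD_eq_getElem pool 0 (by omega), List.getD_eq_getElem pool 0 hj]
  exact List.pairwise_iff_getElem.mp hs i j (by omega) hj hij

theorem getD_mem (pool : List Int) (i : Nat) (h : i < pool.length) : pool.getD i 0 ∈ pool := by
  rw [List.getD_eq_getElem pool 0 h]
  exact List.getElem_mem h

-- ---- min? / min2? as folds ----
def minStep (k : Int → Int) : Option Int → Int → Option Int :=
  fun acc x => match acc with
    | none => some x
    | some m => if k x < k m then some x else some m

def min2Step (p : Int → Bool) (k : Int → Int) : Option Int → Int → Option Int :=
  fun acc x => match acc with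
    | none => some x
    | some m =>
      if ((if p x then (0:Int) else 1) < (if p m then (0:Int) else 1) ∨
          (¬ (if p m then (0:Int) else 1) < (if p x then (0:Int) else 1) ∧ k x < k m))
      then some x else some m

theorem min?_eq_foldl (xs : List Int) (k : Int → Int) :
    PySem.List.min? xs k = xs.foldl (minStep k) none := by
  unfold PySem.List.min? minStep
  congr 1
  funext acc x
  cases acc
  · rfl
  · exact if_congr Iff.rfl rfl rfl

theorem min2?_eq_foldl (xs : List Int) (p : Int → Bool) (k : Int → Int) :
    PySem.List.min2? xs (fun n => if p n then (0:Int) else 1) k = xs.foldl (min2Step p k) none := by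
  unfold PySem.List.min2? min2Step
  congr 1
  funext acc x
  cases acc
  · rfl
  · exact if_congr (by simp) rfl rfl

theorem fold1_some (k : Int → Int) :
    ∀ (xs : List Int) (m : Int), ∃ r, xs.foldl (minStep k) (some m) = some r := by
  intro xs
  induction xs with
  | nil => intro m; exact ⟨m, rfl⟩
  | cons x t ih =>
    intro m
    simp only [List.foldl_cons, minStep]
    split_ifs <;> apply ih

theorem fold1_sorted (k : Int → Int) :
    ∀ (xs : List Int), xs.Pairwise (· < ·) → ∀ m, (∀ x ∈ xs, m < x) →
    ∃ r, xs.foldl (minStep k) (some m) = some r ∧ r ∈ m :: xs ∧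
      ∀ y ∈ m :: xs, k r < k y ∨ (k r = k y ∧ r ≤ y) := by
  intro xs
  induction xs with
  | nil =>
    intro _ m _
    refine ⟨m, rfl, by simp, ?_⟩
    intro y hy
    have := List.mem_singleton.mp hy
    subst this
    right; exact ⟨rfl, le_rfl⟩
  | cons x t ih =>
    intro hs m hlt
    obtain ⟨hxt, hst⟩ := List.pairwise_cons.mp hs
    simp only [List.foldl_cons, minStep]
    by_cases hkx : k x < k m
    · rw [if_pos hkx]
      obtain ⟨r, hr, hrm, hprop⟩ := ih hst x hxt
      refine ⟨r, hr, List.mem_cons_of_mem m hrm, ?_⟩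
      intro y hy
      rcases List.mem_cons.mp hy with rfl | hy
      · rcases hprop x (List.mem_cons_self ..) with h | ⟨h, _⟩
        · left; omega
        · left; omega
      · exact hprop y hy
    · rw [if_neg hkx]
      obtain ⟨r, hr, hrm, hprop⟩ := ih hst m (fun z hz => hlt z (List.mem_cons_of_mem x hz))
      refine ⟨r, hr, ?_, ?_⟩
      · rcases List.mem_cons.mp hrm with rfl | h
        · exact List.mem_cons_self ..
        · exact List.mem_cons_of_mem _ (List.mem_cons_of_mem _ h)
      · intro y hy
        rcases List.mem_cons.mp hy with rfl | hy
        · exact hprop _ (List.mem_cons_self ..)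
        · rcases List.mem_cons.mp hy with rfl | hy
          · rcases hprop m (List.mem_cons_self ..) with h | ⟨h, hle⟩
            · left; omega
            · by_cases hlt2 : k r < k y
              · left; exact hlt2
              · right
                have hmlty : m < y := hlt y (List.mem_cons_self ..)
                exact ⟨by omega, by omega⟩
          · exact hprop y (List.mem_cons_of_mem m hy)

theorem min?_char (k : Int → Int) (xs : List Int) (hs : xs.Pairwise (· < ·)) (hne : xs ≠ []) :
    ∃ r, PySem.List.min? xs k = some r ∧ r ∈ xs ∧
      ∀ y ∈ xs, k r < k y ∨ (k r = k y ∧ r ≤ y) := by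
  cases xs with
  | nil => exact absurd rfl hne
  | cons x t =>
    obtain ⟨hxt, hst⟩ := List.pairwise_cons.mp hs
    obtain ⟨r, hr, hrm, hprop⟩ := fold1_sorted k t hst x hxt
    refine ⟨r, ?_, hrm, hprop⟩
    rw [min?_eq_foldl, List.foldl_cons]
    exact hr

theorem ans_unique (k : Int → Int) (xs : List Int) (r₁ r₂ : Int)
    (h₁ : r₁ ∈ xs ∧ ∀ y ∈ xs, k r₁ < k y ∨ (k r₁ = k y ∧ r₁ ≤ y))
    (h₂ : r₂ ∈ xs ∧ ∀ y ∈ xs, k r₂ < k y ∨ (k r₂ = k y ∧ r₂ ≤ y)) : r₁ = r₂ := by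
  have a := h₁.2 r₂ h₂.1
  have b := h₂.2 r₁ h₁.1
  rcases a with a | ⟨a1, a2⟩ <;> rcases b with b | ⟨b1, b2⟩ <;> omega

-- ---- min2? split into consonant pool / full scale ----
theorem fold2_of_p (p : Int → Bool) (k : Int → Int) :
    ∀ (xs : List Int) (m : Int), p m = true →
      xs.foldl (min2Step p k) (some m) = (xs.filter p).foldl (minStep k) (some m) := by
  intro xs
  induction xs with
  | nil => intro m _; simp
  | cons x t ih =>
    intro m hm
    by_cases hxp : p x = true
    · rw [List.filter_cons_of_pos hxp]
      simp only [List.foldl_cons, min2Step, minStep, hm, hxp, reduceIte]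
      rw [if_congr (show ((0:Int) < 0 ∨ (¬ (0:Int) < 0 ∧ k x < k m)) ↔ k x < k m by omega) rfl rfl]
      by_cases hk : k x < k m
      · rw [if_pos hk]; exact ih x hxp
      · rw [if_neg hk]; exact ih m hm
    · have hx' : p x = false := by simpa using hxp
      rw [List.filter_cons_of_neg (by simpa using hxp)]
      simp only [List.foldl_cons, min2Step, hm, hx', Bool.false_eq_true, reduceIte]
      rw [if_neg (by omega)]
      exact ih m hm

theorem fold2_of_not_p (p : Int → Bool) (k : Int → Int) :
    ∀ (xs : List Int) (m : Int), p m = false →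
      xs.foldl (min2Step p k) (some m) =
        (PySem.List.min? (xs.filter p) k).or (xs.foldl (minStep k) (some m)) := by
  intro xs
  induction xs with
  | nil => intro m _; simp [PySem.List.min?]
  | cons x t ih =>
    intro m hm
    by_cases hxp : p x = true
    · rw [List.filter_cons_of_pos hxp]
      simp only [List.foldl_cons, min2Step, minStep, hm, hxp, Bool.false_eq_true, reduceIte]
      rw [if_pos (by omega)]
      rw [fold2_of_p p k t x hxp]
      rw [min?_eq_foldl, List.foldl_cons]
      have hstep : minStep k none x = some x := rfl
      rw [hstep]
      obtain ⟨r, hr⟩ := fold1_some k (t.filter p) x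
      rw [hr, Option.some_or]
    · have hx' : p x = false := by simpa using hxp
      rw [List.filter_cons_of_neg (by simpa using hxp)]
      simp only [List.foldl_cons, min2Step, minStep, hm, hx', Bool.false_eq_true, reduceIte]
      rw [if_congr (show ((1:Int) < 1 ∨ (¬ (1:Int) < 1 ∧ k x < k m)) ↔ k x < k m by omega) rfl rfl]
      by_cases hk : k x < k m
      · rw [if_pos hk]; exact ih x hx'
      · rw [if_neg hk]; exact ih m hm

theorem min2_split (xs : List Int) (p : Int → Bool) (k : Int → Int) :
    PySem.List.min2? xs (fun n => if p n then (0:Int) else 1) k =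
      (PySem.List.min? (xs.filter p) k).or (PySem.List.min? xs k) := by
  cases xs with
  | nil => rfl
  | cons x t =>
    rw [min2?_eq_foldl, List.foldl_cons]
    have hstep2 : min2Step p k none x = some x := rfl
    rw [hstep2]
    by_cases hx : p x = true
    · rw [fold2_of_p p k t x hx, List.filter_cons_of_pos hx]
      rw [min?_eq_foldl (x :: t.filter p) k, List.foldl_cons]
      have hstep : minStep k none x = some x := rfl
      rw [hstep]
      obtain ⟨r, hr⟩ := fold1_some k (t.filter p) x
      rw [hr, Option.some_or]
    · rw [fold2_of_not_p p k t x (by simpa using hx), List.filter_cons_of_neg (by simpa using hx)]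
      rw [min?_eq_foldl (x :: t) k, List.foldl_cons]
      rfl

-- ---- binary search ----
theorem bisectLoop_spec (pool : List Int) (c : Int)
    (hmono : ∀ i j : Nat, i < j → j < pool.length → pool.getD i 0 < pool.getD j 0) :
    ∀ (fuel lo hi : Nat), hi - lo ≤ fuel → lo ≤ hi → hi ≤ pool.length →
      (∀ j, j < lo → pool.getD j 0 < c) →
      (∀ j, hi ≤ j → j < pool.length → c ≤ pool.getD j 0) →
      lo ≤ bisectLoop pool c lo hi ∧ bisectLoop pool c lo hi ≤ hi ∧
        (∀ j, j < bisectLoop pool c lo hi → pool.getD j 0 < c) ∧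
        (∀ j, bisectLoop pool c lo hi ≤ j → j < pool.length → c ≤ pool.getD j 0) := by
  intro fuel
  induction fuel with
  | zero =>
    intro lo hi hf hlh hhl hbelow habove
    have : lo = hi := by omega
    subst this
    rw [bisectLoop, dif_neg (by omega)]
    exact ⟨le_rfl, le_rfl, hbelow, habove⟩
  | succ f ih =>
    intro lo hi hf hlh hhl hbelow habove
    by_cases h : lo < hi
    · rw [bisectLoop, dif_pos h]
      simp only
      by_cases hc : pool.getD ((lo + hi) / 2) 0 < c
      · rw [if_pos hc]
        obtain ⟨h1, h2, h3, h4⟩ := ih ((lo + hi) / 2 + 1) hi (by omega) (by omega) hhl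
          (fun j hj => by
            rcases Nat.lt_or_ge j ((lo + hi) / 2) with h' | h'
            · exact lt_trans (hmono j ((lo + hi) / 2) h' (by omega)) hc
            · have : j = (lo + hi) / 2 := by omega
              subst this; exact hc)
          habove
        exact ⟨by omega, h2, h3, h4⟩
      · rw [if_neg hc]
        have hcm : c ≤ pool.getD ((lo + hi) / 2) 0 := by omega
        obtain ⟨h1, h2, h3, h4⟩ := ih lo ((lo + hi) / 2) (by omega) (by omega) (by omega) hbelow
          (fun j hj hjl => by
            rcases Nat.lt_or_ge ((lo + hi) / 2) j with h' | h'
            · exact le_trans hcm (le_of_lt (hmono ((lo + hi) / 2) j h' hjl))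
            · have : j = (lo + hi) / 2 := by omega
              subst this; exact hcm)
        exact ⟨h1, by omega, h3, h4⟩
    · rw [bisectLoop, dif_neg h]
      exact ⟨le_rfl, by omega, hbelow, fun j hj hjl => habove j (by omega) hjl⟩

theorem nearest_ans (pool : List Int) (c : Int) (hs : pool.Pairwise (· < ·)) (hne : pool ≠ []) :
    nearest pool c ∈ pool ∧
      ∀ y ∈ pool, |nearest pool c - c| < |y - c| ∨ (|nearest pool c - c| = |y - c| ∧ nearest pool c ≤ y) := by
  have hmono := getD_mono_of_pairwise pool hs
  have hlen : 0 < pool.length := List.length_pos_of_ne_nil hne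
  obtain ⟨h1, h2, h3, h4⟩ := bisectLoop_spec pool c hmono pool.length 0 pool.length le_rfl
    (by omega) le_rfl (fun j hj => absurd hj (by omega)) (fun j hj hjl => absurd hjl (by omega))
  simp only [nearest]
  split_ifs with hj0 hjlen hcase
  · -- j = 0: everything is ≥ c, pool[0] is nearest
    refine ⟨getD_mem pool 0 hlen, ?_⟩
    intro y hy
    obtain ⟨iy, hiy, hyeq⟩ := List.mem_iff_getElem.mp hy
    have hyg : pool.getD iy 0 = y := by rw [List.getD_eq_getElem pool 0 hiy]; exact hyeq
    have hc0 : c ≤ pool.getD 0 0 := h4 0 (by omega) hlen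
    have hcy : c ≤ pool.getD iy 0 := h4 iy (by omega) hiy
    have hm0 : pool.getD iy 0 = pool.getD 0 0 ∨ pool.getD 0 0 < pool.getD iy 0 := by
      rcases Nat.eq_zero_or_pos iy with h | h
      · exact Or.inl (by rw [h])
      · exact Or.inr (hmono 0 iy h hiy)
    rw [← hyg, abs_of_nonneg (by omega), abs_of_nonneg (by omega)]
    omega
  · -- j = length: everything is < c, the last element is nearest
    refine ⟨getD_mem pool (pool.length - 1) (by omega), ?_⟩
    intro y hy
    obtain ⟨iy, hiy, hyeq⟩ := List.mem_iff_getElem.mp hy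
    have hyg : pool.getD iy 0 = y := by rw [List.getD_eq_getElem pool 0 hiy]; exact hyeq
    have hcl : pool.getD (pool.length - 1) 0 < c := h3 (pool.length - 1) (by omega)
    have hcy : pool.getD iy 0 < c := h3 iy (by omega)
    have hm0 : pool.getD iy 0 = pool.getD (pool.length - 1) 0 ∨
        pool.getD iy 0 < pool.getD (pool.length - 1) 0 := by
      rcases Nat.lt_or_ge iy (pool.length - 1) with h | h
      · exact Or.inr (hmono iy (pool.length - 1) h (by omega))
      · exact Or.inl (by rw [show iy = pool.length - 1 by omega])
    rw [← hyg, abs_of_nonpos (by omega), abs_of_nonpos (by omega)]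
    omega
  · -- middle, left neighbour wins (ties included)
    have hjl : bisectLoop pool c 0 pool.length < pool.length := by omega
    have ha : pool.getD (bisectLoop pool c 0 pool.length - 1) 0 < c := h3 _ (by omega)
    have hb : c ≤ pool.getD (bisectLoop pool c 0 pool.length) 0 := h4 _ le_rfl hjl
    refine ⟨getD_mem pool _ (by omega), ?_⟩
    intro y hy
    obtain ⟨iy, hiy, hyeq⟩ := List.mem_iff_getElem.mp hy
    have hyg : pool.getD iy 0 = y := by rw [List.getD_eq_getElem pool 0 hiy]; exact hyeq
    rcases Nat.lt_or_ge iy (bisectLoop pool c 0 pool.length) with hcy | hcy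
    · have hylt : pool.getD iy 0 < c := h3 iy hcy
      have hm0 : pool.getD iy 0 = pool.getD (bisectLoop pool c 0 pool.length - 1) 0 ∨
          pool.getD iy 0 < pool.getD (bisectLoop pool c 0 pool.length - 1) 0 := by
        rcases Nat.lt_or_ge iy (bisectLoop pool c 0 pool.length - 1) with h | h
        · exact Or.inr (hmono iy _ h (by omega))
        · exact Or.inl (by rw [show iy = bisectLoop pool c 0 pool.length - 1 by omega])
      rw [← hyg, abs_of_nonpos (by omega), abs_of_nonpos (by omega)]
      omega
    · have hyge : c ≤ pool.getD iy 0 := h4 iy hcy hiy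
      have hm0 : pool.getD iy 0 = pool.getD (bisectLoop pool c 0 pool.length) 0 ∨
          pool.getD (bisectLoop pool c 0 pool.length) 0 < pool.getD iy 0 := by
        rcases Nat.lt_or_ge (bisectLoop pool c 0 pool.length) iy with h | h
        · exact Or.inr (hmono _ iy h hiy)
        · exact Or.inl (by rw [show iy = bisectLoop pool c 0 pool.length by omega])
      rw [← hyg, abs_of_nonpos (by omega), abs_of_nonneg (by omega)]
      omega
  · -- middle, right neighbour strictly nearer
    have hjl : bisectLoop pool c 0 pool.length < pool.length := by omega
    have ha : pool.getD (bisectLoop pool c 0 pool.length - 1) 0 < c := h3 _ (by omega)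
    have hb : c ≤ pool.getD (bisectLoop pool c 0 pool.length) 0 := h4 _ le_rfl hjl
    refine ⟨getD_mem pool _ (by omega), ?_⟩
    intro y hy
    obtain ⟨iy, hiy, hyeq⟩ := List.mem_iff_getElem.mp hy
    have hyg : pool.getD iy 0 = y := by rw [List.getD_eq_getElem pool 0 hiy]; exact hyeq
    rcases Nat.lt_or_ge iy (bisectLoop pool c 0 pool.length) with hcy | hcy
    · have hylt : pool.getD iy 0 < c := h3 iy hcy
      have hm0 : pool.getD iy 0 = pool.getD (bisectLoop pool c 0 pool.length - 1) 0 ∨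
          pool.getD iy 0 < pool.getD (bisectLoop pool c 0 pool.length - 1) 0 := by
        rcases Nat.lt_or_ge iy (bisectLoop pool c 0 pool.length - 1) with h | h
        · exact Or.inr (hmono iy _ h (by omega))
        · exact Or.inl (by rw [show iy = bisectLoop pool c 0 pool.length - 1 by omega])
      rw [← hyg, abs_of_nonneg (by omega), abs_of_nonpos (by omega)]
      omega
    · have hyge : c ≤ pool.getD iy 0 := h4 iy hcy hiy
      have hm0 : pool.getD iy 0 = pool.getD (bisectLoop pool c 0 pool.length) 0 ∨
          pool.getD (bisectLoop pool c 0 pool.length) 0 < pool.getD iy 0 := by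
        rcases Nat.lt_or_ge (bisectLoop pool c 0 pool.length) iy with h | h
        · exact Or.inr (hmono _ iy h hiy)
        · exact Or.inl (by rw [show iy = bisectLoop pool c 0 pool.length by omega])
      rw [← hyg, abs_of_nonneg (by omega), abs_of_nonneg (by omega)]
      omega

theorem nearest_eq_min? (pool : List Int) (c : Int) (hs : pool.Pairwise (· < ·)) (hne : pool ≠ []) :
    PySem.List.min? pool (fun n => |n - c|) = some (nearest pool c) := by
  obtain ⟨r, hr, hrm, hprop⟩ := min?_char (fun n => |n - c|) pool hs hne
  obtain ⟨hm, hp⟩ := nearest_ans pool c hs hne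
  rw [hr, ans_unique (fun n => |n - c|) pool r (nearest pool c) ⟨hrm, hprop⟩ ⟨hm, hp⟩]

-- ---- pool lookup ----
theorem pool_lookup (scale : List Int) (c : Int) :
    PySem.List.pyGetD (consPools scale) (PySem.Int.mod c 12) [] =
      scale.filter (fun n => consonant_with n c) := by
  unfold consPools
  rw [PySem.List.pyGetD_map_pyRange_of_nonneg _ 12 _ []
      (PySem.Int.mod_nonneg c (by norm_num)) (PySem.Int.mod_lt c (by norm_num))]
  refine List.filter_congr (fun n _ => ?_)
  have h1 : PySem.Int.mod (n - PySem.Int.mod c 12) 12 = PySem.Int.mod (n - c) 12 := by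
    rw [PySem.Int.mod_eq_emod_of_pos (by norm_num), PySem.Int.mod_eq_emod_of_pos (by norm_num),
        PySem.Int.mod_eq_emod_of_pos (by norm_num)]
    omega
  have h2 : |PySem.Int.mod (n - c) 12| = PySem.Int.mod (n - c) 12 :=
    abs_of_nonneg (PySem.Int.mod_nonneg _ (by norm_num))
  unfold consonant_with CONS
  rw [h1, h2]

-- ---- base-note selection equality ----
theorem base_eq (scale : List Int) (c : Int) (hs : scale.Pairwise (· < ·)) (hne : scale ≠ []) :
    nearest (if (scale.filter (fun n => consonant_with n c)).isEmpty then scale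
             else scale.filter (fun n => consonant_with n c)) c =
      (PySem.List.min2? scale (fun n => if consonant_with n c then (0:Int) else 1) (fun n => |n - c|)).getD 0 := by
  rw [min2_split scale (fun n => consonant_with n c) (fun n => |n - c|)]
  by_cases hp : (scale.filter (fun n => consonant_with n c)).isEmpty
  · rw [if_pos hp]
    have : scale.filter (fun n => consonant_with n c) = [] := by simpa [List.isEmpty_iff] using hp
    rw [this, show PySem.List.min? ([] : List Int) (fun n => |n - c|) = none from rfl,
        Option.none_or, nearest_eq_min? scale c hs hne]
    rfl
  · rw [if_neg hp]
    have hne' : scale.filter (fun n => consonant_with n c) ≠ [] := by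
      simpa [List.isEmpty_iff] using hp
    rw [nearest_eq_min? _ c (hs.filter _) hne']
    rfl

-- ---- contains over Set.ofList ----
theorem contains_ofList (xs : List Int) (x : Int) :
    PySem.Set.contains (PySem.Set.ofList xs) x = xs.contains x := by
  by_cases h : x ∈ xs
  · simp [PySem.Set.contains_eq_listContains, PySem.Set.mem_ofList, h]
  · simp [PySem.Set.contains_eq_listContains, PySem.Set.mem_ofList, h]

-- ---- step-note equality ----
theorem step_eq (p : Int) (scale : List Int) :
    step_note p (PySem.Set.ofList scale) =
      (PySem.List.min? (let o := step_options p scale; if o.isEmpty then [p] else o) (fun n => |n - p|)).getD 0 := by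
  have e1 : |p - 2 - p| = 2 := by rw [show p - 2 - p = (-2:Int) by ring]; decide
  have e2 : |p - 1 - p| = 1 := by rw [show p - 1 - p = (-1:Int) by ring]; decide
  have e3 : |p + 1 - p| = 1 := by rw [show p + 1 - p = (1:Int) by ring]; decide
  have e4 : |p + 2 - p| = 2 := by rw [show p + 2 - p = (2:Int) by ring]; decide
  have e0 : |p - p| = 0 := by rw [show p - p = (0:Int) by ring]; decide
  by_cases h1 : (p-2) ∈ scale <;> by_cases h2 : (p-1) ∈ scale <;>
    by_cases h3 : (p+1) ∈ scale <;> by_cases h4 : (p+2) ∈ scale <;>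
    simp [step_note, step_options, contains_ofList, PySem.List.min?, List.filter,
      h1, h2, h3, h4, e0, e1, e2, e3, e4]

-- ---- resolution-note equality ----
theorem res_eq (held : Int) (scale : List Int) :
    res_note held (PySem.Set.ofList scale) =
      (PySem.List.pyGet? (let r := ([held-1, held-2] : List Int).filter (fun n => scale.contains n)
                          if r.isEmpty then (let so := step_options held scale; if so.isEmpty then [held] else so) else r) 0).getD 0 := by
  by_cases h1 : (held-1) ∈ scale <;> by_cases h2 : (held-2) ∈ scale <;>
    by_cases h3 : (held+1) ∈ scale <;> by_cases h4 : (held+2) ∈ scale <;>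
    simp [res_note, step_options, contains_ofList, List.filter, h1, h2, h3, h4, PySem.List.pyGet?, PySem.List.pyIdx?]

-- ---- one bar of B = A's block ----
theorem altStep_eq (cantus_slots scale : List Int) (species : String) (out : List Int) (k : Int)
    (hs : scale.Pairwise (· < ·)) (hne : scale ≠ []) :
    altStep cantus_slots scale (PySem.Set.ofList scale) (consPools scale) species out k =
      out ++ species_blockA ((PySem.List.pyGet? cantus_slots (8*k)).getD 0) scale species := by
  have hb : ∀ c, nearest (if (scale.filter (fun n => consonant_with n c)).isEmpty then scale
      else scale.filter (fun n => consonant_with n c)) c =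
      (PySem.List.min2? scale (fun n => if consonant_with n c then (0:Int) else 1) (fun n => |n - c|)).getD 0 :=
    fun c => base_eq scale c hs hne
  simp only [altStep, species_blockA, pool_lookup, hb, step_eq, res_eq]

theorem pyRange_one_nil (a b : Int) (h : ¬ a < b) : PySem.List.pyRange a b 1 = [] := by
  refine List.eq_nil_iff_forall_not_mem.mpr (fun x hx => ?_)
  rw [PySem.List.mem_pyRange_one] at hx
  omega

theorem foldB_eq_blocks (cantus_slots scale : List Int) (species : String) (bars : Int)
    (hs : scale.Pairwise (· < ·)) (hne : scale ≠ []) :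
    ∀ (n : Nat) (k : Int), (bars - k).toNat ≤ n →
      ∀ out, (PySem.List.pyRange k bars 1).foldl (altStep cantus_slots scale (PySem.Set.ofList scale) (consPools scale) species) out
        = out ++ blocks cantus_slots scale species (bars * 8) (8 * k) := by
  intro n
  induction n with
  | zero =>
    intro k hk out
    have hkb : ¬ k < bars := by omega
    rw [pyRange_one_nil k bars hkb, List.foldl_nil, blocks, dif_neg (by omega)]
    simp
  | succ m ih =>
    intro k hk out
    by_cases hkb : k < bars
    · rw [PySem.List.pyRange_one_cons (by omega), List.foldl_cons]
      rw [altStep_eq cantus_slots scale species out k hs hne]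
      rw [ih (k+1) (by omega)]
      conv_rhs => rw [blocks, dif_pos (by omega)]
      rw [show 8 * (k + 1) = 8 * k + 8 by ring, List.append_assoc]
    · rw [pyRange_one_nil k bars hkb, List.foldl_nil, blocks, dif_neg (by omega)]
      simp

-- ===== VERDICT (by name: the statement is the Claim_ definition above) =====
theorem generate_counter_species_spec : Claim_equal_generate_counter_species := by
  intro cantus_slots key mode raga bars species register _hdom hpre
  unfold Spec_generate_counter_species
  simp only [generate_counter_species, generate_counter_species_alt]
  set scale := scale_midis key mode raga register.1 register.2 with hscale
  rw [loopA_eq_blocks, List.nil_append]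
  by_cases hb : 0 < bars
  · obtain ⟨hlen, hne⟩ := hpre.2 hb
    rw [foldB_eq_blocks cantus_slots scale species bars (sorted_scale _ _ _ _ _) hne
        (bars - 0).toNat 0 le_rfl []]
    rw [List.nil_append, mul_zero]
    have hlenb : (blocks cantus_slots scale species (bars*8) 0).length = 8 * bars.toNat :=
      length_blocks cantus_slots scale species (bars*8) bars.toNat 0 (by omega)
    rw [PySem.List.slice_to _ (by positivity)]
    rw [show (bars*8).toNat = (blocks cantus_slots scale species (bars*8) 0).length by omega]
    exact List.take_length
  · rw [blocks, dif_neg (by omega), pyRange_one_nil 0 bars (by omega), List.foldl_nil]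
    simp [PySem.List.slice]
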